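-- pv_equiv track=rewrite | github.com/FBDistributors/WMS | backend/app/integrations/smartup/products_sync.py | _normalize_barcode
-- ===== SOURCE A (Python) =====
-- def _normalize_barcode(raw: str | None) -> tuple[str | None, list[str]]:
--     if not raw:
--         return None, []
--     tokens = [token.strip() for token in raw.replace(";", ",").replace(" ", ",").split(",")]
--     normalized = []
--     for token in tokens:
--         if not token:
--             continue
--         digits = "".join(ch for ch in token if ch.isdigit())
--         if digits:
--             normalized.append(digits)
--     primary = normalized[0] if normalized else None
--     return primary, normalized
-- ===== SOURCE B (Python) =====
-- def _normalize_barcode(raw):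
--     if not raw:
--         return None, []
--     result = []
--     buf = ""
--     for ch in raw:
--         if ch in ";, ":
--             if buf:
--                 result.append(buf)
--             buf = ""
--         elif ch.isdigit():
--             buf += ch
--     if buf:
--         result.append(buf)
--     return (result[0] if result else None), result
-- ===== Notes on version B (the rewrite author's own statement) =====
-- stated objective: alternative
-- what changed: Replaced A's replace/replace/split/strip multi-pass token pipeline with a single left-to-right scan that keeps a digit buffer and flushes it at delimiter characters.
import Mathlib
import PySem

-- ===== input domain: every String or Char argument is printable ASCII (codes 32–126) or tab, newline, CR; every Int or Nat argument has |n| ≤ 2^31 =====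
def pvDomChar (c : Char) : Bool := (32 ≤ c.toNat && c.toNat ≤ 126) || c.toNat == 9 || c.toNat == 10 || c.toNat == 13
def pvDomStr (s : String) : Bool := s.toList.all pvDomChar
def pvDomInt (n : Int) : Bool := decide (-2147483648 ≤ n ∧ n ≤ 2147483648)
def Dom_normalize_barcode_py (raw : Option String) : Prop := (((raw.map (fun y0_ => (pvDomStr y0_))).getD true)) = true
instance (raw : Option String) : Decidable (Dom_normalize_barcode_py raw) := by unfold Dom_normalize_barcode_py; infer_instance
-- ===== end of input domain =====

-- B replaces A's replace/replace/split/strip token pipeline by one left-to-right scan with a digit buffer (alternative decomposition, same cost).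


-- ===== PORT A =====
-- the body of A's 'for token in tokens' accumulator loop
def pvAStep (acc : List (List Char)) (token : List Char) : List (List Char) :=
  if token = [] then acc
  else
    let digits := token.filter PySem.Chars.isdigit   -- "".join(ch for ch in token if ch.isdigit())
    if digits = [] then acc else acc ++ [digits]

def normalize_barcode_py (raw : Option String) : Option String × List String :=
  match raw with
  | none => (none, [])                               -- 'if not raw'
  | some s =>
    if s = "" then (none, [])
    else
      let tokens : List (List Char) :=
        (PySem.Chars.splitOn
          (PySem.Chars.replace (PySem.Chars.replace s.toList [';'] [',']) [' '] [','])
          [',']).map PySem.Chars.strip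
      let normalized := tokens.foldl pvAStep []
      ((normalized.map String.ofList).head?, normalized.map String.ofList)

-- ===== PORT B =====
-- flush the digit buffer: append it to the result only if non-empty
def pvFlush (buf : List Char) (acc : List (List Char)) : List (List Char) :=
  if buf = [] then acc else acc ++ [buf]

-- one character of B's scan: a delimiter character flushes, a digit extends the buffer, anything else is ignored
def pvBStep (st : List Char × List (List Char)) (ch : Char) : List Char × List (List Char) :=
  if ch = ';' ∨ ch = ',' ∨ ch = ' ' then ([], pvFlush st.1 st.2)
  else if PySem.Chars.isdigit ch then (st.1 ++ [ch], st.2)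
  else st

def normalize_barcode_py_alt (raw : Option String) : Option String × List String :=
  match raw with
  | none => (none, [])
  | some s =>
    if s = "" then (none, [])
    else
      let st := s.toList.foldl pvBStep ([], [])
      let result := pvFlush st.1 st.2
      ((result.map String.ofList).head?, result.map String.ofList)

-- ===== PRECONDITION & SPEC =====
def Spec_normalize_barcode_py (raw : Option String) (out : Option String × List String) : Prop := out = normalize_barcode_py_alt raw
instance (raw : Option String) (out : Option String × List String) : Decidable (Spec_normalize_barcode_py raw out) := by unfold Spec_normalize_barcode_py; infer_instance

-- ===== CLAIM (what is proved, stated in full; the proofs are below) =====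
def Claim_equal_normalize_barcode_py : Prop := ∀ (raw : Option String), Dom_normalize_barcode_py raw → Spec_normalize_barcode_py raw (normalize_barcode_py raw)

-- ===== LEMMAS AND PROOFS =====

-- a delimiter character of A's pipeline / B's scan
def pvDelim (c : Char) : Bool := c = ';' || c = ',' || c = ' '

-- canonical split of a char list at the characters satisfying p (result is always non-empty)
def pvSplit (p : Char → Bool) : List Char → List (List Char)
  | [] => [[]]
  | c :: t => if p c then [] :: pvSplit p t else (pvSplit p t).modifyHead (c :: ·)

-- the substitution performed by A's two 'replace' calls
def pvSubst (c : Char) : Char := if c = ';' then ',' else if c = ' ' then ',' else c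

-- keep the non-empty digit groups
def pvKeep (segs : List (List Char)) : List (List Char) := segs.filter (fun seg => !seg.isEmpty)

-- the common normal form both programs compute
def pvCore (cs : List Char) : List (List Char) :=
  pvKeep ((pvSplit pvDelim cs).map (List.filter PySem.Chars.isdigit))

theorem pvReplace_single (a b : Char) : ∀ (fuel : Nat) (l acc : List Char), l.length ≤ fuel →
    PySem.Chars.replace.go [a] [b] fuel l acc =
      acc.reverse ++ l.map (fun c => if c = a then b else c) := by
  intro fuel
  induction fuel with
  | zero =>
    intro l acc h
    have hl : l = [] := List.length_eq_zero_iff.mp (Nat.le_zero.mp h)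
    subst hl; simp [PySem.Chars.replace.go]
  | succ n ih =>
    intro l acc h
    cases l with
    | nil => simp [PySem.Chars.replace.go]
    | cons c t =>
      have ht : t.length ≤ n := by simpa using h
      by_cases hc : c = a
      · subst hc
        simp [PySem.Chars.replace.go, List.isPrefixOf, ih t (b :: acc) ht]
      · simp [PySem.Chars.replace.go, List.isPrefixOf, hc, ih t (c :: acc) ht,
          show ¬ (a == c) = true by simpa using fun h' => hc h'.symm]

theorem pvChars_replace_single (l : List Char) (a b : Char) :
    PySem.Chars.replace l [a] [b] = l.map (fun c => if c = a then b else c) := by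
  simpa using pvReplace_single a b l.length l [] le_rfl

theorem pvSplitOn_single (d : Char) : ∀ (fuel : Nat) (l cur : List Char) (acc : List (List Char)),
    l.length ≤ fuel →
    PySem.Chars.splitOn.go [d] fuel l cur acc =
      acc.reverse ++ (pvSplit (fun c => c == d) l).modifyHead (fun seg => cur.reverse ++ seg) := by
  intro fuel
  induction fuel with
  | zero =>
    intro l cur acc h
    have hl : l = [] := List.length_eq_zero_iff.mp (Nat.le_zero.mp h)
    subst hl; simp [PySem.Chars.splitOn.go, pvSplit]
  | succ n ih =>
    intro l cur acc h
    cases l with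
    | nil => simp [PySem.Chars.splitOn.go, pvSplit]
    | cons c rest =>
      have ht : rest.length ≤ n := by simpa using h
      by_cases hc : c = d
      · subst hc
        have hgo : PySem.Chars.splitOn.go [c] (n + 1) (c :: rest) cur acc
            = PySem.Chars.splitOn.go [c] n rest [] (cur.reverse :: acc) := by
          simp [PySem.Chars.splitOn.go, List.isPrefixOf]
        rw [hgo, ih rest [] (cur.reverse :: acc) ht]
        simp only [pvSplit, BEq.rfl, if_true]
        cases pvSplit (fun c' => c' == c) rest <;> simp
      · have hgo : PySem.Chars.splitOn.go [d] (n + 1) (c :: rest) cur acc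
            = PySem.Chars.splitOn.go [d] n rest (c :: cur) acc := by
          simp [PySem.Chars.splitOn.go, List.isPrefixOf,
            show (d == c) = false by simpa using fun h' => hc h'.symm]
        rw [hgo, ih rest (c :: cur) acc ht]
        simp only [pvSplit, show (c == d) = false by simpa using hc, Bool.false_eq_true,
          if_false, List.reverse_cons]
        cases pvSplit (fun c' => c' == d) rest <;> simp
        
theorem pvModifyHead_id (X : List (List Char)) :
    X.modifyHead (fun seg => seg) = X := by
  cases X <;> simp

theorem pvChars_splitOn_single (l : List Char) (d : Char) :
    PySem.Chars.splitOn l [d] = pvSplit (fun c => c == d) l := by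
  have h := pvSplitOn_single d (l.length + 1) l [] [] (Nat.le_succ _)
  simpa [PySem.Chars.splitOn, pvModifyHead_id] using h

theorem pvSubst_eq (c : Char) :
    (if (if c = ';' then ',' else c) = ' ' then ',' else (if c = ';' then ',' else c)) = pvSubst c := by
  unfold pvSubst
  by_cases h1 : c = ';' <;> by_cases h2 : c = ' ' <;> simp [h1, h2]

theorem pvSplit_map_subst (l : List Char) :
    pvSplit (fun c => c == ',') (l.map pvSubst) = pvSplit pvDelim l := by
  induction l with
  | nil => rfl
  | cons c t ih =>
    by_cases hd : pvDelim c = true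
    · have hsub : pvSubst c = ',' := by
        rcases (by simpa [pvDelim, or_assoc] using hd : c = ';' ∨ c = ',' ∨ c = ' ') with h | h | h <;>
          subst h <;> rfl
      simp [pvSplit, hsub, hd, ih]
    · have hne : ¬ c = ',' := fun h => hd (by simp [pvDelim, h])
      have hsub : pvSubst c = c := by
        have h1 : ¬ c = ';' := fun h => hd (by simp [pvDelim, h])
        have h2 : ¬ c = ' ' := fun h => hd (by simp [pvDelim, h])
        simp [pvSubst, h1, h2]
      simp [pvSplit, hsub, hd, hne, ih]

theorem pvSpaceNotDigit (c : Char) (h : PySem.Chars.isspace c = true) :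
    PySem.Chars.isdigit c = false := by
  simp only [PySem.Chars.isspace, Bool.or_eq_true, Bool.and_eq_true, decide_eq_true_eq] at h
  simp only [PySem.Chars.isdigit, Bool.and_eq_false_iff, decide_eq_false_iff_not, Char.le_def]
  rw [show ('0' : Char).val = 48 by decide, show ('9' : Char).val = 57 by decide]
  simp only [UInt32.le_iff_toNat_le]
  have h48 : (48 : UInt32).toNat = 48 := rfl
  have h57 : (57 : UInt32).toNat = 57 := rfl
  have hcc : c.toNat = c.val.toNat := rfl
  omega

theorem pvFilter_dropWhile (l : List Char) :
    (l.dropWhile PySem.Chars.isspace).filter PySem.Chars.isdigit = l.filter PySem.Chars.isdigit := by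
  induction l with
  | nil => rfl
  | cons c t ih =>
    by_cases hs : PySem.Chars.isspace c = true
    · simp [hs, pvSpaceNotDigit c hs, ih]
    · simp [hs]

theorem pvFilter_strip (t : List Char) :
    (PySem.Chars.strip t).filter PySem.Chars.isdigit = t.filter PySem.Chars.isdigit := by
  unfold PySem.Chars.strip PySem.Chars.rstrip PySem.Chars.lstrip
  rw [List.filter_reverse, pvFilter_dropWhile, List.filter_reverse, List.reverse_reverse,
    pvFilter_dropWhile]

theorem pvAFold (segs : List (List Char)) : ∀ (acc : List (List Char)),
    (segs.map PySem.Chars.strip).foldl pvAStep acc =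
      acc ++ pvKeep (segs.map (List.filter PySem.Chars.isdigit)) := by
  induction segs with
  | nil => intro acc; simp [pvKeep]
  | cons s rest ih =>
    intro acc
    have hstep : pvAStep acc (PySem.Chars.strip s) =
        if s.filter PySem.Chars.isdigit = [] then acc else acc ++ [s.filter PySem.Chars.isdigit] := by
      unfold pvAStep
      by_cases hs : PySem.Chars.strip s = []
      · have : s.filter PySem.Chars.isdigit = [] := by
          rw [← pvFilter_strip, hs]; rfl
        simp [hs, this]
      · simp [hs, pvFilter_strip]
    simp only [List.map_cons, List.foldl_cons, hstep, ih]
    by_cases hd : s.filter PySem.Chars.isdigit = [] <;>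
      simp [hd, pvKeep]

theorem pvBFold (l : List Char) : ∀ (buf : List Char) (acc : List (List Char)),
    (fun st => pvFlush st.1 st.2) (l.foldl pvBStep (buf, acc)) =
      acc ++ pvKeep (((pvSplit pvDelim l).map (List.filter PySem.Chars.isdigit)).modifyHead
        (fun seg => buf ++ seg)) := by
  induction l with
  | nil =>
    intro buf acc
    by_cases hb : buf = [] <;> simp [pvSplit, pvKeep, pvFlush, hb]
  | cons c t ih =>
    intro buf acc
    by_cases hd : c = ';' ∨ c = ',' ∨ c = ' '
    · have hdb : pvDelim c = true := by
        simp only [pvDelim, Bool.or_eq_true, decide_eq_true_eq]; tauto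
      simp only [List.foldl_cons, pvBStep, if_pos hd, ih [] (pvFlush buf acc), pvSplit, hdb,
        if_true, List.map_cons, List.filter_nil, List.modifyHead_cons, List.nil_append]
      by_cases hb : buf = [] <;>
        simp [pvFlush, hb, pvKeep, pvModifyHead_id]
    · have hdb : pvDelim c = false := by
        simp only [pvDelim, Bool.or_eq_false_iff, decide_eq_false_iff_not]
        tauto
      by_cases hdig : PySem.Chars.isdigit c = true
      · simp only [List.foldl_cons, pvBStep, if_neg hd, hdig, if_true,
          ih (buf ++ [c]) acc, pvSplit, hdb, Bool.false_eq_true, if_false]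
        cases pvSplit pvDelim t with
        | nil => simp
        | cons h0 rest => simp [hdig]
      · simp only [List.foldl_cons, pvBStep, if_neg hd, hdig, Bool.false_eq_true, if_false,
          ih buf acc, pvSplit, hdb]
        cases pvSplit pvDelim t with
        | nil => simp
        | cons h0 rest =>
          simp [show PySem.Chars.isdigit c = false by simpa using hdig]

theorem pvA_core (cs : List Char) :
    (((PySem.Chars.splitOn
        (PySem.Chars.replace (PySem.Chars.replace cs [';'] [',']) [' '] [','])
        [',']).map PySem.Chars.strip).foldl pvAStep []) = pvCore cs := by
  rw [pvChars_replace_single, pvChars_replace_single, List.map_map]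
  have hcomp : ((fun c => if c = ' ' then ',' else c) ∘ fun c => if c = ';' then ',' else c)
      = pvSubst := funext pvSubst_eq
  rw [hcomp, pvChars_splitOn_single, pvSplit_map_subst, pvAFold, List.nil_append, pvCore]

theorem pvB_core (cs : List Char) :
    pvFlush (cs.foldl pvBStep ([], [])).1 (cs.foldl pvBStep ([], [])).2 = pvCore cs := by
  simpa [pvCore, pvModifyHead_id] using pvBFold cs [] []

-- ===== VERDICT (by name: the statement is the Claim_ definition above) =====
theorem normalize_barcode_py_spec : Claim_equal_normalize_barcode_py := by
  intro raw _
  unfold Spec_normalize_barcode_py normalize_barcode_py normalize_barcode_py_alt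
  cases raw with
  | none => rfl
  | some s =>
    by_cases hs : s = ""
    · simp [hs]
    · simp only [hs, if_false]
      rw [pvA_core s.toList, pvB_core s.toList]
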